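-- pv_equiv track=rewrite | github.com/Fazman-s/p4python | probwords.py | formword
-- ===== SOURCE A (Python) =====
-- def formword(word, char_count):
--     word_count = {}
--     for char in word:
--         if char not in word_count:
--             word_count[char] = 0
--         word_count[char] += 1
--
--     for char, count in word_count.items():
--         if char not in char_count or char_count[char] < count:
--             return False
--     return True
-- ===== SOURCE B (Python) =====
-- def formword(word, char_count):
--     budget = dict(char_count)
--     for char in word:
--         remaining = budget.get(char, 0)
--         if remaining <= 0:
--             return False
--         budget[char] = remaining - 1
--     return True
-- ===== Notes on version B (the rewrite author's own statement) =====
-- stated objective: faster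
-- what changed: Replaces A's two passes (build a full frequency table of word, then compare each distinct character's count against char_count) with a single early-exiting scan of word that decrements a per-character budget copied from char_count.
import Mathlib
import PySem

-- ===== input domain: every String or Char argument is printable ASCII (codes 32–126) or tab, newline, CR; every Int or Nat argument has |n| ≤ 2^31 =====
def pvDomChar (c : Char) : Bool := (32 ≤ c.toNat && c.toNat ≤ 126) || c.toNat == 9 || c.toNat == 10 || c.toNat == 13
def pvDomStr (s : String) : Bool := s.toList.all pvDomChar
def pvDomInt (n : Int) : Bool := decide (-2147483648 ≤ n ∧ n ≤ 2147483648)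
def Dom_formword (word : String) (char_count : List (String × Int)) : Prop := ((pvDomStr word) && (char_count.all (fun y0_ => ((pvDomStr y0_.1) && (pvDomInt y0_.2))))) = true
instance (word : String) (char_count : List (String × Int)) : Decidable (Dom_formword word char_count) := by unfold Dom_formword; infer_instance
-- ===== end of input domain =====

-- B replaces A's two passes (build a full frequency table, then compare it key by key against
-- char_count) by a single early-exiting scan of word that decrements a per-character budget
-- copied from char_count (objective: alternative decomposition; return value only, no mutation).

-- Python iterates a str by 1-character strings; dict keys here are Strings.
def pvKey (c : Char) : String := String.ofList [c]

-- ===== PORT A =====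
-- second loop of A: for char, count in word_count.items(): if char not in char_count or char_count[char] < count: return False
def formwordCheck : List (String × Int) → PySem.Dict String Int → Bool
  | [], _ => true
  | (c, n) :: rest, cc =>
    -- char_count[char] is only read when the key is present, so getD 0 is exact here
    if !(cc.contains c) || decide (cc.getD c 0 < n) then false
    else formwordCheck rest cc

def formword (word : String) (char_count : List (String × Int)) : Bool :=
  let cc := PySem.Dict.ofList char_count
  let wc := word.toList.foldl (fun d c =>
      let k := pvKey c
      let d := if d.contains k then d else d.insert k (0 : Int)
      d.insert k (d.getD k 0 + 1)) PySem.Dict.empty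
  formwordCheck wc.items cc

-- ===== PORT B =====
-- for char in word: remaining = budget.get(char, 0); if remaining <= 0: return False; budget[char] = remaining - 1
def formwordAltGo : PySem.Dict String Int → List Char → Bool
  | _, [] => true
  | budget, c :: rest =>
    let remaining := budget.getD (pvKey c) 0
    if remaining ≤ 0 then false
    else formwordAltGo (budget.insert (pvKey c) (remaining - 1)) rest

def formword_alt (word : String) (char_count : List (String × Int)) : Bool :=
  formwordAltGo (PySem.Dict.ofList char_count) word.toList

-- ===== PRECONDITION & SPEC =====
def Spec_formword (word : String) (char_count : List (String × Int)) (out : Bool) : Prop := out = formword_alt word char_count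
instance (word : String) (char_count : List (String × Int)) (out : Bool) : Decidable (Spec_formword word char_count out) := by unfold Spec_formword; infer_instance

-- ===== CLAIM (what is proved, stated in full; the proofs are below) =====
def Claim_equal_formword : Prop := ∀ (word : String) (char_count : List (String × Int)), Dom_formword word char_count → Spec_formword word char_count (formword word char_count)

-- ===== LEMMAS AND PROOFS =====

theorem pvKey_inj : Function.Injective pvKey := by
  intro a b h
  have := congrArg String.toList h
  simpa [pvKey] using this

-- A's counting step is insert k (getD k 0 + 1)
theorem formword_stepA (d : PySem.Dict String Int) (c : Char) :
    (let k := pvKey c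
     let d := if d.contains k then d else d.insert k (0 : Int)
     d.insert k (d.getD k 0 + 1)) = d.insert (pvKey c) (d.getD (pvKey c) 0 + 1) := by
  by_cases h : d.contains (pvKey c) = true
  · simp [h]
  · simp only [Bool.not_eq_true] at h
    rw [PySem.Dict.getD_of_not_contains d 0 h]
    simp [h, PySem.Dict.getD_insert_self, PySem.Dict.insert_insert_self]

-- A's first loop builds Counter(map pvKey word)
theorem formword_counter (word : String) :
    word.toList.foldl (fun d c =>
      let k := pvKey c
      let d := if d.contains k then d else d.insert k (0 : Int)
      d.insert k (d.getD k 0 + 1)) PySem.Dict.empty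
    = PySem.Dict.counter (word.toList.map pvKey) := by
  rw [← PySem.Dict.foldl_insert_getD_add_one_eq_counter, List.foldl_map]
  have hf : (fun (d : PySem.Dict String Int) (c : Char) =>
      let k := pvKey c
      let d := if d.contains k then d else d.insert k (0 : Int)
      d.insert k (d.getD k 0 + 1))
    = (fun d c => d.insert (pvKey c) (d.getD (pvKey c) 0 + 1)) := funext₂ formword_stepA
  rw [hf]

-- the second loop succeeds iff every listed pair passes the membership-and-count test
theorem formwordCheck_iff (l : List (String × Int)) (cc : PySem.Dict String Int) :
    formwordCheck l cc = true ↔ ∀ p ∈ l, cc.contains p.1 = true ∧ p.2 ≤ cc.getD p.1 0 := by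
  induction l with
  | nil => simp [formwordCheck]
  | cons p rest ih =>
    obtain ⟨c, n⟩ := p
    by_cases h : (!(cc.contains c) || decide (cc.getD c 0 < n)) = true
    · simp only [formwordCheck, if_pos h]
      simp only [Bool.or_eq_true, Bool.not_eq_true', decide_eq_true_eq] at h
      constructor
      · intro hfalse; cases hfalse
      · intro hall
        have := hall (c, n) (List.mem_cons_self)
        dsimp only at this
        rcases h with h | h
        · rw [this.1] at h; cases h
        · omega
    · simp only [formwordCheck, if_neg h, ih]
      simp only [Bool.or_eq_true, Bool.not_eq_true', decide_eq_true_eq, not_or, not_lt,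
        Bool.not_eq_false] at h
      constructor
      · intro hall q hq
        rcases List.mem_cons.1 hq with rfl | hq
        · exact ⟨h.1, h.2⟩
        · exact hall q hq
      · intro hall q hq
        exact hall q (List.mem_cons_of_mem _ hq)

-- B's scan succeeds iff every character's total multiplicity fits its budget
theorem formwordAltGo_iff (cs : List Char) (budget : PySem.Dict String Int) :
    formwordAltGo budget cs = true ↔
      ∀ c ∈ cs, (cs.count c : Int) ≤ budget.getD (pvKey c) 0 := by
  induction cs generalizing budget with
  | nil => simp [formwordAltGo]
  | cons c rest ih =>
    by_cases h : budget.getD (pvKey c) 0 ≤ 0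
    · simp only [formwordAltGo, if_pos h]
      constructor
      · intro hfalse; cases hfalse
      · intro hall
        have := hall c (List.mem_cons_self)
        have hcnt : 1 ≤ (c :: rest).count c := List.count_pos_iff.2 (List.mem_cons_self)
        omega
    · push Not at h
      simp only [formwordAltGo, if_neg (not_le.2 h), ih]
      constructor
      · intro hall c' hc'
        simp only [PySem.Dict.getD_insert] at hall
        by_cases hec : c' = c
        · subst hec
          by_cases hmem : c' ∈ rest
          · have := hall c' hmem
            rw [if_pos rfl] at this
            have hcnt : (c' :: rest).count c' = rest.count c' + 1 := by
              simp
            omega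
          · have hcnt : (c' :: rest).count c' = 1 := by
              simp [List.count_eq_zero.2 hmem]
            omega
        · rcases List.mem_cons.1 hc' with rfl | hmem
          · exact absurd rfl hec
          · have := hall c' hmem
            rw [if_neg (fun hk => hec (pvKey_inj hk))] at this
            have hne : c ≠ c' := fun hh => hec hh.symm
            have hcnt : (c :: rest).count c' = rest.count c' := by
              simp [hne]
            omega
      · intro hall c' hc'
        simp only [PySem.Dict.getD_insert]
        by_cases hec : c' = c
        · subst hec
          have := hall c' (List.mem_cons_self)
          have hcnt : (c' :: rest).count c' = rest.count c' + 1 := by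
            simp
          rw [if_pos rfl]
          omega
        · have := hall c' (List.mem_cons_of_mem _ hc')
          have hne : c ≠ c' := fun hh => hec hh.symm
          have hcnt : (c :: rest).count c' = rest.count c' := by
            simp [hne]
          rw [if_neg (fun hk => hec (pvKey_inj hk))]
          omega

-- ===== VERDICT (by name: the statement is the Claim_ definition above) =====
theorem formword_spec : Claim_equal_formword := by
  intro word char_count _
  unfold Spec_formword
  apply Bool.coe_iff_coe.mp
  show formword word char_count = true ↔ formword_alt word char_count = true
  rw [formword, formword_alt, formword_counter, formwordAltGo_iff, formwordCheck_iff,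
    PySem.Dict.items_counter]
  constructor
  · intro hall c hc
    have hk : pvKey c ∈ PySem.Set.ofList (word.toList.map pvKey) := by
      rw [PySem.Set.mem_ofList]
      exact List.mem_map_of_mem hc
    have := hall (pvKey c, ((word.toList.map pvKey).count (pvKey c) : Int))
      (List.mem_map_of_mem hk)
    rw [List.count_map_of_injective _ _ pvKey_inj] at this
    exact this.2
  · intro hall p hp
    obtain ⟨k, hk, rfl⟩ := List.mem_map.1 hp
    rw [PySem.Set.mem_ofList] at hk
    obtain ⟨c, hc, rfl⟩ := List.mem_map.1 hk
    rw [List.count_map_of_injective _ _ pvKey_inj]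
    have hle := hall c hc
    have hcnt : 1 ≤ word.toList.count c := List.count_pos_iff.2 hc
    refine ⟨?_, hle⟩
    by_contra hcon
    simp only [Bool.not_eq_true] at hcon
    have h0 : (PySem.Dict.ofList char_count).getD (pvKey c) 0 = 0 :=
      PySem.Dict.getD_of_not_contains _ 0 hcon
    omega
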